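-- pv_equiv track=rewrite | github.com/mohammadfaiizan/ProjectI | DSA/Problem/Graph/07_Topological_Sort_DAG/444_Sequence_Reconstruction.py | sequenceReconstruction_optimized_validation
-- ===== SOURCE A (Python) =====
-- from typing import List, Set
--
-- def sequenceReconstruction_optimized_validation(nums: List[int], sequences: List[List[int]]) -> bool:
--     """
--     Approach 5: Optimized Single-Pass Validation
--
--     Optimize validation with single-pass checking.
--
--     Time: O(V + E), Space: O(V)
--     """
--     if not sequences:
--         return False
--
--     n = len(nums)
--     pos = {num: i for i, num in enumerate(nums)}
--
--     # Check all sequence numbers are valid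
--     seq_nums = set()
--     for seq in sequences:
--         for num in seq:
--             if num not in pos:
--                 return False
--             seq_nums.add(num)
--
--     if len(seq_nums) != n:
--         return False
--
--     # Track predecessors for each number
--     predecessors = [set() for _ in range(n)]
--
--     for seq in sequences:
--         for i in range(len(seq) - 1):
--             curr_pos = pos[seq[i]]
--             next_pos = pos[seq[i + 1]]
--
--             # Check order consistency
--             if curr_pos >= next_pos:
--                 return False
--
--             # Add predecessor relationship
--             predecessors[next_pos].add(curr_pos)
--
--     # Check if each position (except first) has exactly the previous position as predecessor
--     for i in range(1, n):
--         if i - 1 not in predecessors[i]: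
--             return False
--
--     return True
-- ===== SOURCE B (Python) =====
-- def sequenceReconstruction_optimized_validation(nums, sequences):
--     """Kahn's topological sort: peel nodes of in-degree 0 one at a time; the queue must
--     stay a singleton and the peel order must be exactly nums."""
--     if not sequences:
--         return False
--     num_set = set(nums)
--     indeg = {}
--     adj = {}
--     for seq in sequences:
--         for x in seq:
--             if x not in num_set:
--                 return False
--             if x not in indeg:
--                 indeg[x] = 0
--                 adj[x] = []
--         for a, b in zip(seq, seq[1:]):
--             if b not in adj[a]:
--                 adj[a].append(b)
--                 indeg[b] += 1
--     if len(indeg) != len(nums):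
--         return False
--     queue = [x for x in indeg if indeg[x] == 0]
--     order = []
--     while len(queue) == 1:
--         x = queue.pop()
--         order.append(x)
--         for y in adj[x]:
--             indeg[y] -= 1
--             if indeg[y] == 0:
--                 queue.append(y)
--     return not queue and order == nums
-- ===== Notes on version B (the rewrite author's own statement) =====
-- stated objective: alternative
-- what changed: A records a predecessor set per position and then checks positionally that each position i has i-1 among its predecessors; B instead runs Kahn's topological sort over a deduplicated adjacency/in-degree graph, requiring the zero-in-degree queue to stay a singleton while peeling, and accepts iff the peel order is exactly nums.
import Mathlib
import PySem

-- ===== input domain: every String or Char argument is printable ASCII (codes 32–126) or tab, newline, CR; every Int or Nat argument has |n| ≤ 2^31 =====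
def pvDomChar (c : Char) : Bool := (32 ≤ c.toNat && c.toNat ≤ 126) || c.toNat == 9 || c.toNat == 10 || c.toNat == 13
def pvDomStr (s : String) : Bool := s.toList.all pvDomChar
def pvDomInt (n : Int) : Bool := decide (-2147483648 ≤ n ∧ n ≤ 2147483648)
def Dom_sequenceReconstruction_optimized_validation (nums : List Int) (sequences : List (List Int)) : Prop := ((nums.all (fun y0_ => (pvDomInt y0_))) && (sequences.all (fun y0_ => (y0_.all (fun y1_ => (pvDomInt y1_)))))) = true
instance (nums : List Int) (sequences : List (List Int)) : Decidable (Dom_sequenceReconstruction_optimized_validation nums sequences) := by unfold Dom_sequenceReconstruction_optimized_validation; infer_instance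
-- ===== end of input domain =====

-- B replaces A's per-position predecessor-set check by Kahn's topological sort (adjacency +
-- in-degree, the zero-in-degree queue must stay a singleton, the peel order must equal nums);
-- objective: alternative algorithm, same asymptotic cost.

-- ===== PORT A =====

-- pos = {num: i for i, num in enumerate(nums)}
def pvPos (nums : List Int) : PySem.Dict Int Int :=
  (PySem.List.enumerate nums).foldl (fun d p => d.insert p.2 p.1) PySem.Dict.empty

-- inner 'for num in seq: if num not in pos: return False; seq_nums.add(num)'  (none = early 'return False')
def pvSeqNumsInner (pos : PySem.Dict Int Int) : List Int → PySem.Set Int → Option (PySem.Set Int)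
  | [], s => some s
  | x :: t, s => if pos.contains x then pvSeqNumsInner pos t (PySem.Set.add s x) else none

-- outer 'for seq in sequences:' of the first validation loop
def pvSeqNumsLoop (pos : PySem.Dict Int Int) : List (List Int) → PySem.Set Int → Option (PySem.Set Int)
  | [], s => some s
  | q :: rest, s =>
    match pvSeqNumsInner pos q s with
    | none => none
    | some s' => pvSeqNumsLoop pos rest s'

-- 'for i in range(len(seq) - 1):' of the predecessor loop; pos[...] is ported as getD _ 0, exact here
-- because the first loop already returned False on any number missing from pos
def pvPredsInner (pos : PySem.Dict Int Int) : List Int → List (PySem.Set Int) → Option (List (PySem.Set Int))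
  | a :: b :: t, preds =>
    let currPos := pos.getD a 0
    let nextPos := pos.getD b 0
    if nextPos ≤ currPos then none
    else pvPredsInner pos (b :: t) (preds.modify nextPos.toNat (fun s => PySem.Set.add s currPos))
  | _, preds => some preds

def pvPredsLoop (pos : PySem.Dict Int Int) : List (List Int) → List (PySem.Set Int) → Option (List (PySem.Set Int))
  | [], preds => some preds
  | q :: rest, preds =>
    match pvPredsInner pos q preds with
    | none => none
    | some preds' => pvPredsLoop pos rest preds'

def sequenceReconstruction_optimized_validation (nums : List Int) (sequences : List (List Int)) : Bool :=
  if sequences.isEmpty then false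
  else
    let n := nums.length
    let pos := pvPos nums
    match pvSeqNumsLoop pos sequences PySem.Set.empty with
    | none => false
    | some seqNums =>
      if seqNums.length ≠ n then false
      else
        match pvPredsLoop pos sequences (List.replicate n PySem.Set.empty) with
        | none => false
        | some preds =>
          -- 'for i in range(1, n): if i - 1 not in predecessors[i]: return False'; predecessors[i]
          -- ported as pyGetD _ i ∅, exact here because 1 ≤ i < n = len(predecessors)
          (PySem.List.pyRange 1 (n : Int) 1).all
            (fun i => PySem.Set.contains (PySem.List.pyGetD preds i PySem.Set.empty) (i - 1))

-- ===== PORT B =====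

-- node pass: 'for x in seq: if x not in num_set: return False; if x not in indeg: indeg[x]=0; adj[x]=[]'
def pvAddNodes (numSet : PySem.Set Int) :
    List Int → PySem.Dict Int Int → PySem.Dict Int (List Int) →
    Option (PySem.Dict Int Int × PySem.Dict Int (List Int))
  | [], indeg, adj => some (indeg, adj)
  | x :: t, indeg, adj =>
    if !(PySem.Set.contains numSet x) then none
    else if indeg.contains x then pvAddNodes numSet t indeg adj
    else pvAddNodes numSet t (indeg.insert x 0) (adj.insert x [])

-- edge pass: 'for a, b in zip(seq, seq[1:]): if b not in adj[a]: adj[a].append(b); indeg[b] += 1'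
-- indeg[b] / adj[a] ported as getD: the keys are present (the node pass of the same seq inserted them)
def pvAddEdges : List (Int × Int) → PySem.Dict Int Int → PySem.Dict Int (List Int) →
    PySem.Dict Int Int × PySem.Dict Int (List Int)
  | [], indeg, adj => (indeg, adj)
  | p :: t, indeg, adj =>
    if (adj.getD p.1 []).contains p.2 then pvAddEdges t indeg adj
    else pvAddEdges t (indeg.insert p.2 (indeg.getD p.2 0 + 1))
           (adj.insert p.1 (adj.getD p.1 [] ++ [p.2]))

-- 'for seq in sequences:' of the graph-building loop
def pvBuild (numSet : PySem.Set Int) :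
    List (List Int) → PySem.Dict Int Int → PySem.Dict Int (List Int) →
    Option (PySem.Dict Int Int × PySem.Dict Int (List Int))
  | [], indeg, adj => some (indeg, adj)
  | q :: rest, indeg, adj =>
    match pvAddNodes numSet q indeg adj with
    | none => none
    | some (indeg', adj') =>
      let s := pvAddEdges (q.zip q.tail) indeg' adj'
      pvBuild numSet rest s.1 s.2

-- 'for y in adj[x]: indeg[y] -= 1; if indeg[y] == 0: queue.append(y)'
def pvRelax : List Int → PySem.Dict Int Int → List Int → PySem.Dict Int Int × List Int
  | [], indeg, queue => (indeg, queue)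
  | y :: t, indeg, queue =>
    let indeg' := indeg.insert y (indeg.getD y 0 - 1)
    if indeg'.getD y 0 == 0 then pvRelax t indeg' (queue ++ [y])
    else pvRelax t indeg' queue

-- 'while len(queue) == 1: x = queue.pop(); order.append(x); <relax>'  — fuel recursion: the loop
-- pops one node per iteration and every node is enqueued at most once, so nums.length+1 iterations
-- always suffice (the loop runs only after the key-count check equates node count with len(nums))
def pvKahn (adj : PySem.Dict Int (List Int)) :
    Nat → PySem.Dict Int Int → List Int → List Int → List Int × List Int
  | 0, _, queue, order => (queue, order)
  | fuel + 1, indeg, queue, order =>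
    match queue with
    | [x] =>
      let s := pvRelax (adj.getD x []) indeg []
      pvKahn adj fuel s.1 s.2 (order ++ [x])
    | _ => (queue, order)

def sequenceReconstruction_optimized_validation_alt (nums : List Int) (sequences : List (List Int)) : Bool :=
  if sequences.isEmpty then false
  else
    let numSet := PySem.Set.ofList nums
    match pvBuild numSet sequences PySem.Dict.empty PySem.Dict.empty with
    | none => false
    | some (indeg, adj) =>
      if indeg.keys.length ≠ nums.length then false
      else
        -- queue = [x for x in indeg if indeg[x] == 0]
        let queue := indeg.keys.filter (fun x => indeg.getD x 0 == 0)
        let res := pvKahn adj (nums.length + 1) indeg queue []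
        res.1.isEmpty && res.2 == nums

-- ===== PRECONDITION & SPEC =====
def Spec_sequenceReconstruction_optimized_validation (nums : List Int) (sequences : List (List Int)) (out : Bool) : Prop := out = sequenceReconstruction_optimized_validation_alt nums sequences
instance (nums : List Int) (sequences : List (List Int)) (out : Bool) : Decidable (Spec_sequenceReconstruction_optimized_validation nums sequences out) := by unfold Spec_sequenceReconstruction_optimized_validation; infer_instance

-- ===== CLAIM (what is proved, stated in full; the proofs are below) =====
def Claim_equal_sequenceReconstruction_optimized_validation : Prop := ∀ (nums : List Int) (sequences : List (List Int)), Dom_sequenceReconstruction_optimized_validation nums sequences → Spec_sequenceReconstruction_optimized_validation nums sequences (sequenceReconstruction_optimized_validation nums sequences)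

-- ===== LEMMAS AND PROOFS =====

def pvPairs (ss : List (List Int)) : List (Int × Int) := ss.flatMap (fun q => q.zip q.tail)

def pvValid (pos : PySem.Dict Int Int) (ss : List (List Int)) : Bool :=
  ss.all (fun q => q.all (fun x => pos.contains x))

theorem pvSeqNumsInner_eq (pos : PySem.Dict Int Int) (q : List Int) (s : PySem.Set Int) :
    pvSeqNumsInner pos q s =
      if q.all (fun x => pos.contains x) then some (PySem.Set.update s q) else none := by
  induction q generalizing s with
  | nil => simp [pvSeqNumsInner, PySem.Set.update_nil]
  | cons x t ih =>
    simp only [pvSeqNumsInner, List.all_cons, PySem.Set.update_cons]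
    by_cases h : pos.contains x = true
    · simp [h, ih]
    · simp [h]

theorem pvSeqNumsLoop_eq (pos : PySem.Dict Int Int) (ss : List (List Int)) (s : PySem.Set Int) :
    pvSeqNumsLoop pos ss s =
      if pvValid pos ss then some (ss.foldl PySem.Set.update s) else none := by
  induction ss generalizing s with
  | nil => simp [pvSeqNumsLoop, pvValid]
  | cons q rest ih =>
    simp only [pvSeqNumsLoop, pvSeqNumsInner_eq, List.foldl_cons]
    by_cases h : q.all (fun x => pos.contains x) = true
    · have hval : pvValid pos (q :: rest) = pvValid pos rest := by simp [pvValid, List.all_cons, h]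
      simp [h, ih, hval]
    · have h' : q.all (fun x => pos.contains x) = false := by simpa using h
      have hval : pvValid pos (q :: rest) = false := by simp [pvValid, List.all_cons, h']
      simp [h', hval]

theorem pvPredsInner_eq (pos : PySem.Dict Int Int) (q : List Int) (preds : List (PySem.Set Int)) :
    pvPredsInner pos q preds =
      if (q.zip q.tail).any (fun p => pos.getD p.2 0 ≤ pos.getD p.1 0) then none
      else some ((q.zip q.tail).foldl
        (fun pr p => pr.modify (pos.getD p.2 0).toNat (fun s => PySem.Set.add s (pos.getD p.1 0))) preds) := by
  induction q generalizing preds with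
  | nil => simp [pvPredsInner]
  | cons a t ih =>
    cases t with
    | nil => simp [pvPredsInner]
    | cons b t' =>
      simp only [pvPredsInner, List.tail_cons, List.zip_cons_cons, List.any_cons, List.foldl_cons]
      by_cases h : pos.getD b 0 ≤ pos.getD a 0
      · simp [h]
      · simp only [h, decide_false, Bool.false_or]
        rw [ih]; simp

theorem pvPredsLoop_eq (pos : PySem.Dict Int Int) (ss : List (List Int)) (preds : List (PySem.Set Int)) :
    pvPredsLoop pos ss preds =
      if (pvPairs ss).any (fun p => pos.getD p.2 0 ≤ pos.getD p.1 0) then none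
      else some ((pvPairs ss).foldl
        (fun pr p => pr.modify (pos.getD p.2 0).toNat (fun s => PySem.Set.add s (pos.getD p.1 0))) preds) := by
  induction ss generalizing preds with
  | nil => simp [pvPredsLoop, pvPairs]
  | cons q rest ih =>
    simp only [pvPredsLoop, pvPredsInner_eq, pvPairs, List.flatMap_cons, List.any_append,
      List.foldl_append]
    by_cases h : ((q.zip q.tail).any (fun p => decide (pos.getD p.2 0 ≤ pos.getD p.1 0))) = true
    · simp [h]
    · have h' : ((q.zip q.tail).any (fun p => decide (pos.getD p.2 0 ≤ pos.getD p.1 0))) = false := by simpa using h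
      simp only [h', Bool.false_eq_true, if_false, Bool.false_or]
      rw [ih]; rfl

theorem pvPos_keys (nums : List Int) : (pvPos nums).keys = PySem.Set.ofList nums := by
  have h := PySem.Dict.keys_foldl_insert_key (ν := Int) (PySem.List.enumerate nums 0)
    (fun p => p.2) (fun _ p => p.1) PySem.Dict.empty
  simpa [pvPos, PySem.List.map_snd_enumerate, PySem.Dict.keys_empty,
    PySem.Set.update_nil_left] using h

theorem pvPos_contains (nums : List Int) (y : Int) : (pvPos nums).contains y = true ↔ y ∈ nums := by
  rw [PySem.Dict.contains_iff_mem_keys, pvPos_keys, PySem.Set.mem_ofList]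

theorem pvPos_get?_aux (xs : List Int) (s : Int) (d : PySem.Dict Int Int) (y : Int)
    (hn : xs.Nodup) :
    ((PySem.List.enumerate xs s).foldl (fun d p => d.insert p.2 p.1) d).get? y =
      match PySem.List.index? xs y with
      | some k => some (s + (k : Int))
      | none => d.get? y := by
  induction xs generalizing s d with
  | nil => simp [PySem.List.enumerate_nil, PySem.List.index?]
  | cons x t ih =>
    rw [PySem.List.enumerate_cons]
    simp only [List.foldl_cons]
    rcases List.nodup_cons.mp hn with ⟨hx, ht⟩
    rw [ih _ _ ht]
    by_cases hyx : y = x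
    · subst hyx
      have : PySem.List.index? (y :: t) y = some 0 := PySem.List.index?_cons_self y t
      rw [this]
      have hnot : PySem.List.index? t y = none := by
        rw [PySem.List.index?_eq_none_iff]; exact hx
      rw [hnot]
      simp [PySem.Dict.get?_insert_self]
    · rw [PySem.List.index?_cons_of_ne _ (fun h => hyx h.symm)]
      cases hidx : PySem.List.index? t y with
      | none => simp [PySem.Dict.get?_insert_of_ne _ _ hyx]
      | some k => simp; ring

theorem pvPos_get?_nodup (nums : List Int) (hn : nums.Nodup) (y : Int) :
    (pvPos nums).get? y =
      match PySem.List.index? nums y with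
      | some k => some ((k : Int))
      | none => none := by
  rw [pvPos, pvPos_get?_aux nums 0 PySem.Dict.empty y hn]
  cases PySem.List.index? nums y <;> simp [PySem.Dict.get?_empty]

theorem pvPos_getD_mem (nums : List Int) (hn : nums.Nodup) (y : Int) (hy : y ∈ nums) :
    ∃ k : Nat, ∃ hk : k < nums.length, nums[k] = y ∧ (pvPos nums).getD y 0 = (k : Int) := by
  have hs : (PySem.List.index? nums y).isSome = true := (PySem.List.index?_isSome_iff nums y).mpr hy
  cases hidx : PySem.List.index? nums y with
  | none => rw [hidx] at hs; simp at hs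
  | some k =>
    obtain ⟨hk, hget, -⟩ := PySem.List.getElem_of_index?_eq_some hidx
    refine ⟨k, hk, hget, ?_⟩
    rw [PySem.Dict.getD_eq_get?_getD, pvPos_get?_nodup nums hn, hidx]
    rfl

theorem pvPos_getD_getElem (nums : List Int) (hn : nums.Nodup) (k : Nat) (hk : k < nums.length) :
    (pvPos nums).getD nums[k] 0 = (k : Int) := by
  obtain ⟨j, hj, hget, hval⟩ := pvPos_getD_mem nums hn nums[k] (List.getElem_mem hk)
  have : j = k := (List.Nodup.getElem_inj_iff hn).mp hget
  rw [hval, this]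

theorem pvNodup_of_cover (nums : List Int) (cov : List Int) (hnd : cov.Nodup)
    (hsub : cov ⊆ nums) (hlen : cov.length = nums.length) : nums.Nodup := by
  have hsp := List.subperm_of_subset hnd hsub
  have hperm := hsp.perm_of_length_le (le_of_eq hlen.symm)
  exact hperm.nodup_iff.mp hnd

theorem pvPerm_of_cover (nums : List Int) (cov : List Int) (hnd : cov.Nodup)
    (hsub : cov ⊆ nums) (hlen : cov.length = nums.length) : cov.Perm nums := by
  have hsp := List.subperm_of_subset hnd hsub
  exact hsp.perm_of_length_le (le_of_eq hlen.symm)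

theorem pvPredsFold_length (pos : PySem.Dict Int Int) (ps : List (Int × Int))
    (preds : List (PySem.Set Int)) :
    (ps.foldl (fun pr p => pr.modify (pos.getD p.2 0).toNat
      (fun s => PySem.Set.add s (pos.getD p.1 0))) preds).length = preds.length := by
  induction ps generalizing preds with
  | nil => rfl
  | cons p rest ih => simp [ih, List.length_modify]

theorem pvPredsFold_mem (pos : PySem.Dict Int Int) (ps : List (Int × Int))
    (preds : List (PySem.Set Int)) (j : Nat) (hj : j < preds.length) (c : Int) :
    (c ∈ (ps.foldl (fun pr p => pr.modify (pos.getD p.2 0).toNat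
        (fun s => PySem.Set.add s (pos.getD p.1 0))) preds)[j]'(by rw [pvPredsFold_length]; exact hj)) ↔
      c ∈ preds[j] ∨ ∃ p ∈ ps, (pos.getD p.2 0).toNat = j ∧ pos.getD p.1 0 = c := by
  induction ps generalizing preds with
  | nil => simp
  | cons p rest ih =>
    simp only [List.foldl_cons]
    rw [ih _ (by simpa [List.length_modify] using hj)]
    have hmod : (preds.modify (pos.getD p.2 0).toNat (fun s => PySem.Set.add s (pos.getD p.1 0)))[j]'(by simp [List.length_modify]; exact hj)
        = if (pos.getD p.2 0).toNat = j then PySem.Set.add preds[j] (pos.getD p.1 0) else preds[j] := by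
      rw [List.getElem_modify]
    rw [hmod]
    by_cases hcase : (pos.getD p.2 0).toNat = j
    · rw [if_pos hcase]
      simp only [PySem.Set.mem_add, List.mem_cons]
      constructor
      · rintro (⟨h | h⟩ | h)
        · exact Or.inl h
        · exact Or.inr ⟨p, Or.inl rfl, hcase, h.symm⟩
        · rcases h with ⟨p', hp', h1, h2⟩; exact Or.inr ⟨p', Or.inr hp', h1, h2⟩
      · rintro (h | ⟨p', hp' | hp', h1, h2⟩)
        · exact Or.inl (Or.inl h)
        · subst hp'; exact Or.inl (Or.inr h2.symm)
        · exact Or.inr ⟨p', hp', h1, h2⟩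
    · rw [if_neg hcase]
      simp only [List.mem_cons]
      constructor
      · rintro (h | ⟨p', hp', h1, h2⟩)
        · exact Or.inl h
        · exact Or.inr ⟨p', Or.inr hp', h1, h2⟩
      · rintro (h | ⟨p', hp' | hp', h1, h2⟩)
        · exact Or.inl h
        · subst hp'; exact absurd h1 hcase
        · exact Or.inr ⟨p', hp', h1, h2⟩

theorem pvPairs_mem_comp (ss : List (List Int)) (p : Int × Int) (hp : p ∈ pvPairs ss) :
    ∃ q ∈ ss, p.1 ∈ q ∧ p.2 ∈ q := by
  rw [pvPairs, List.mem_flatMap] at hp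
  obtain ⟨q, hq, hzip⟩ := hp
  obtain ⟨a, b⟩ := p
  have := List.of_mem_zip hzip
  exact ⟨q, hq, this.1, List.mem_of_mem_tail this.2⟩

-- ===== abstract graph view of B =====

def pvSuccsOf (l : List (Int × Int)) (x : Int) : List Int :=
  PySem.Set.ofList ((l.filter (fun p => p.1 == x)).map Prod.snd)

def pvPredsOf (l : List (Int × Int)) (y : Int) : List Int :=
  PySem.Set.ofList ((l.filter (fun p => p.2 == y)).map Prod.fst)

theorem pvMem_succsOf (l : List (Int × Int)) (a b : Int) : b ∈ pvSuccsOf l a ↔ (a, b) ∈ l := by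
  simp only [pvSuccsOf, PySem.Set.mem_ofList, List.mem_map, List.mem_filter, beq_iff_eq]
  constructor
  · rintro ⟨⟨pa, pb⟩, ⟨hp, h1⟩, h2⟩
    simp only at h1 h2; subst h1; subst h2; exact hp
  · intro h; exact ⟨(a, b), ⟨h, rfl⟩, rfl⟩

theorem pvMem_predsOf (l : List (Int × Int)) (a b : Int) : a ∈ pvPredsOf l b ↔ (a, b) ∈ l := by
  simp only [pvPredsOf, PySem.Set.mem_ofList, List.mem_map, List.mem_filter, beq_iff_eq]
  constructor
  · rintro ⟨⟨pa, pb⟩, ⟨hp, h1⟩, h2⟩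
    simp only at h1 h2; subst h1; subst h2; exact hp
  · intro h; exact ⟨(a, b), ⟨h, rfl⟩, rfl⟩

theorem pvNodup_succsOf (l : List (Int × Int)) (x : Int) : (pvSuccsOf l x).Nodup :=
  PySem.Set.nodup_ofList _

theorem pvNodup_predsOf (l : List (Int × Int)) (y : Int) : (pvPredsOf l y).Nodup :=
  PySem.Set.nodup_ofList _

theorem pvSuccsOf_append (l : List (Int × Int)) (p : Int × Int) (x : Int) :
    pvSuccsOf (l ++ [p]) x =
      if x = p.1 then PySem.Set.add (pvSuccsOf l x) p.2 else pvSuccsOf l x := by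
  by_cases h : x = p.1
  · have hf : List.filter (fun q => q.1 == x) [p] = [p] := by simp [h.symm]
    simp only [pvSuccsOf, List.filter_append, List.map_append, if_pos h, hf]
    simp [PySem.Set.ofList_append_singleton]
  · have hf : List.filter (fun q => q.1 == x) [p] = [] := by
      have : ((p.1 == x) : Bool) = false := by
        simp only [beq_eq_false_iff_ne, ne_eq]
        exact fun hc => h hc.symm
      simp [this]
    simp only [pvSuccsOf, List.filter_append, List.map_append, if_neg h, hf]
    simp

theorem pvPredsOf_append (l : List (Int × Int)) (p : Int × Int) (y : Int) :
    pvPredsOf (l ++ [p]) y =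
      if y = p.2 then PySem.Set.add (pvPredsOf l y) p.1 else pvPredsOf l y := by
  by_cases h : y = p.2
  · have hf : List.filter (fun q => q.2 == y) [p] = [p] := by simp [h.symm]
    simp only [pvPredsOf, List.filter_append, List.map_append, if_pos h, hf]
    simp [PySem.Set.ofList_append_singleton]
  · have hf : List.filter (fun q => q.2 == y) [p] = [] := by
      have : ((p.2 == y) : Bool) = false := by
        simp only [beq_eq_false_iff_ne, ne_eq]
        exact fun hc => h hc.symm
      simp [this]
    simp only [pvPredsOf, List.filter_append, List.map_append, if_neg h, hf]
    simp


def pvEdgeInv (l : List (Int × Int)) (indeg : PySem.Dict Int Int)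
    (adj : PySem.Dict Int (List Int)) : Prop :=
  (∀ a : Int, adj.getD a [] = pvSuccsOf l a) ∧
  (∀ b : Int, indeg.getD b 0 = ((pvPredsOf l b).length : Int))

theorem pvAddNodes_char (numSet : PySem.Set Int) (q : List Int) (indeg : PySem.Dict Int Int)
    (adj : PySem.Dict Int (List Int)) (hsync : ∀ y, adj.contains y = indeg.contains y) :
    (pvAddNodes numSet q indeg adj = none ↔ ¬ ∀ x ∈ q, x ∈ numSet) ∧
    (∀ i' a', pvAddNodes numSet q indeg adj = some (i', a') →
      (∀ y, i'.getD y 0 = indeg.getD y 0) ∧ (∀ y, a'.getD y [] = adj.getD y []) ∧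
      i'.keys = PySem.Set.update indeg.keys q ∧ (∀ y, a'.contains y = i'.contains y)) := by
  induction q generalizing indeg adj with
  | nil =>
    refine ⟨by simp [pvAddNodes], ?_⟩
    intro i' a' h
    simp only [pvAddNodes, Option.some.injEq, Prod.mk.injEq] at h
    obtain ⟨h1, h2⟩ := h
    subst h1; subst h2
    exact ⟨fun _ => rfl, fun _ => rfl, by simp [PySem.Set.update_nil], hsync⟩
  | cons x t ih =>
    by_cases hx : x ∈ numSet
    · have hc : PySem.Set.contains numSet x = true := (PySem.Set.contains_iff _ _).mpr hx
      by_cases hk : indeg.contains x = true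
      · have hstep : pvAddNodes numSet (x :: t) indeg adj = pvAddNodes numSet t indeg adj := by
          simp only [pvAddNodes]
          rw [hc, hk]
          simp
        obtain ⟨ihn, ihs⟩ := ih indeg adj hsync
        constructor
        · rw [hstep, ihn]
          constructor
          · intro hbad hall; exact hbad fun y hy => hall y (List.mem_cons_of_mem _ hy)
          · intro hbad hall
            refine hbad fun y hy => ?_
            rcases List.mem_cons.mp hy with rfl | hy'
            · exact hx
            · exact hall y hy'
        · intro i' a' h
          rw [hstep] at h
          obtain ⟨g1, g2, g3, g4⟩ := ihs i' a' h
          refine ⟨g1, g2, ?_, g4⟩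
          rw [g3, PySem.Set.update_cons]
          have : PySem.Set.add indeg.keys x = indeg.keys :=
            PySem.Set.add_of_mem ((PySem.Dict.contains_iff_mem_keys _ _).mp hk)
          rw [this]
      · have hkf : indeg.contains x = false := by simpa using hk
        have haf : adj.contains x = false := by rw [hsync]; exact hkf
        have hstep : pvAddNodes numSet (x :: t) indeg adj =
            pvAddNodes numSet t (indeg.insert x 0) (adj.insert x []) := by
          simp only [pvAddNodes]
          rw [hc, hkf]
          simp
        have hsync' : ∀ y, (adj.insert x ([] : List Int)).contains y = (indeg.insert x 0).contains y := by
          intro y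
          rw [PySem.Dict.contains_insert, PySem.Dict.contains_insert, hsync]
        obtain ⟨ihn, ihs⟩ := ih (indeg.insert x 0) (adj.insert x []) hsync'
        constructor
        · rw [hstep, ihn]
          constructor
          · intro hbad hall; exact hbad fun y hy => hall y (List.mem_cons_of_mem _ hy)
          · intro hbad hall
            refine hbad fun y hy => ?_
            rcases List.mem_cons.mp hy with rfl | hy'
            · exact hx
            · exact hall y hy'
        · intro i' a' h
          rw [hstep] at h
          obtain ⟨g1, g2, g3, g4⟩ := ihs i' a' h
          refine ⟨?_, ?_, ?_, g4⟩
          · intro y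
            rw [g1 y, PySem.Dict.getD_insert]
            split_ifs with hxy
            · subst hxy; exact (PySem.Dict.getD_of_not_contains _ _ hkf).symm
            · rfl
          · intro y
            rw [g2 y, PySem.Dict.getD_insert]
            split_ifs with hxy
            · subst hxy; exact (PySem.Dict.getD_of_not_contains _ _ haf).symm
            · rfl
          · rw [g3, PySem.Dict.keys_insert_of_not_contains _ _ hkf,
              PySem.Set.update_cons]
            have hxnk : x ∉ indeg.keys := by
              rw [← PySem.Dict.contains_iff_mem_keys]; simpa using hk
            rw [PySem.Set.add_of_not_mem hxnk]
    · have hc : PySem.Set.contains numSet x = false := by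
        rw [← Bool.not_eq_true, PySem.Set.contains_iff]; exact hx
      have hstep : pvAddNodes numSet (x :: t) indeg adj = none := by
        simp only [pvAddNodes]
        rw [hc]
        simp
      constructor
      · rw [hstep]
        simp only [true_iff]
        intro hall
        exact hx (hall x (List.mem_cons_self))
      · intro i' a' h
        rw [hstep] at h
        exact absurd h (by simp)

theorem pvAddEdges_char (ps : List (Int × Int)) (l : List (Int × Int))
    (indeg : PySem.Dict Int Int) (adj : PySem.Dict Int (List Int))
    (hinv : pvEdgeInv l indeg adj)
    (hkeys : ∀ p ∈ ps, p.1 ∈ indeg.keys ∧ p.2 ∈ indeg.keys)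
    (hsync : ∀ y, adj.contains y = indeg.contains y) :
    pvEdgeInv (l ++ ps) (pvAddEdges ps indeg adj).1 (pvAddEdges ps indeg adj).2 ∧
    (pvAddEdges ps indeg adj).1.keys = indeg.keys ∧
    (∀ y, (pvAddEdges ps indeg adj).2.contains y = (pvAddEdges ps indeg adj).1.contains y) := by
  induction ps generalizing l indeg adj with
  | nil => exact ⟨by simpa [pvAddEdges] using hinv, rfl, hsync⟩
  | cons p t ih =>
    obtain ⟨hadj, hindeg⟩ := hinv
    have hl : l ++ p :: t = (l ++ [p]) ++ t := by simp
    by_cases hmem : p.2 ∈ pvSuccsOf l p.1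
    · have hcond : (adj.getD p.1 []).contains p.2 = true := by
        rw [hadj]; exact List.elem_eq_true_of_mem hmem
      have hstep : pvAddEdges (p :: t) indeg adj = pvAddEdges t indeg adj := by
        simp only [pvAddEdges]
        rw [hcond]
        simp
      rw [hstep, hl]
      refine ih (l ++ [p]) indeg adj ⟨?_, ?_⟩
        (fun p' hp' => hkeys p' (List.mem_cons_of_mem _ hp')) hsync
      · intro a
        rw [hadj a, pvSuccsOf_append]
        split_ifs with ha
        · subst ha
          exact (PySem.Set.add_of_mem hmem).symm
        · rfl
      · intro b
        rw [hindeg b, pvPredsOf_append]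
        split_ifs with hb
        · subst hb
          have : p.1 ∈ pvPredsOf l p.2 := (pvMem_predsOf _ _ _).mpr ((pvMem_succsOf _ _ _).mp hmem)
          rw [PySem.Set.add_of_mem this]
        · rfl
    · have hcond : (adj.getD p.1 []).contains p.2 = false := by
        rw [hadj, ← Bool.not_eq_true]
        simpa using hmem
      have hstep : pvAddEdges (p :: t) indeg adj =
          pvAddEdges t (indeg.insert p.2 (indeg.getD p.2 0 + 1))
            (adj.insert p.1 (adj.getD p.1 [] ++ [p.2])) := by
        simp only [pvAddEdges]
        rw [hcond]
        simp
      rw [hstep, hl]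
      have hpe : (p.1, p.2) ∉ l := fun hc => hmem ((pvMem_succsOf _ _ _).mpr hc)
      have hp1k : p.1 ∈ indeg.keys := (hkeys p (List.mem_cons_self)).1
      have hp2k : p.2 ∈ indeg.keys := (hkeys p (List.mem_cons_self)).2
      have hk2 : (indeg.insert p.2 (indeg.getD p.2 0 + 1)).keys = indeg.keys :=
        PySem.Dict.keys_insert_of_contains _ _
          ((PySem.Dict.contains_iff_mem_keys _ _).mpr hp2k)
      have hsync' : ∀ y, (adj.insert p.1 (adj.getD p.1 [] ++ [p.2])).contains y
          = (indeg.insert p.2 (indeg.getD p.2 0 + 1)).contains y := by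
        intro y
        rw [PySem.Dict.contains_insert, PySem.Dict.contains_insert, hsync]
        by_cases h1 : y = p.1
        · subst h1
          simp [( (PySem.Dict.contains_iff_mem_keys _ _).mpr hp1k : indeg.contains p.1 = true)]
        · by_cases h2 : y = p.2
          · subst h2
            simp [( (PySem.Dict.contains_iff_mem_keys _ _).mpr hp2k : indeg.contains p.2 = true)]
          · have e1 : (y == p.1) = false := by simp [h1]
            have e2 : (y == p.2) = false := by simp [h2]
            rw [e1, e2]
      have hres := ih (l ++ [p]) (indeg.insert p.2 (indeg.getD p.2 0 + 1))
        (adj.insert p.1 (adj.getD p.1 [] ++ [p.2]))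
        ⟨?_, ?_⟩ (fun p' hp' => by
          rw [hk2]; exact hkeys p' (List.mem_cons_of_mem _ hp')) hsync'
      · exact ⟨hres.1, by rw [hres.2.1, hk2], hres.2.2⟩
      · intro a
        rw [PySem.Dict.getD_insert, pvSuccsOf_append]
        split_ifs with ha
        · subst ha
          rw [hadj, PySem.Set.add_of_not_mem hmem]
        · exact hadj a
      · intro b
        rw [PySem.Dict.getD_insert, pvPredsOf_append]
        split_ifs with hb
        · subst hb
          have hnp : p.1 ∉ pvPredsOf l p.2 := fun hc => hpe ((pvMem_predsOf _ _ _).mp hc)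
          rw [PySem.Set.add_of_not_mem hnp, hindeg]
          simp [List.length_append]
        · exact hindeg b

theorem pvBuild_char (numSet : PySem.Set Int) (ss : List (List Int)) (l : List (Int × Int))
    (indeg : PySem.Dict Int Int) (adj : PySem.Dict Int (List Int))
    (hinv : pvEdgeInv l indeg adj) (hnd : indeg.keys.Nodup)
    (hsync : ∀ y, adj.contains y = indeg.contains y) :
    (pvBuild numSet ss indeg adj = none ↔ ¬ ∀ q ∈ ss, ∀ x ∈ q, x ∈ numSet) ∧
    (∀ i' a', pvBuild numSet ss indeg adj = some (i', a') →
       pvEdgeInv (l ++ pvPairs ss) i' a' ∧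
       i'.keys = PySem.Set.update indeg.keys (ss.flatMap (fun q => q)) ∧ i'.keys.Nodup) := by
  induction ss generalizing l indeg adj with
  | nil =>
    refine ⟨by simp [pvBuild], ?_⟩
    intro i' a' h
    simp only [pvBuild, Option.some.injEq, Prod.mk.injEq] at h
    obtain ⟨h1, h2⟩ := h
    subst h1; subst h2
    refine ⟨by simpa [pvPairs] using hinv, by simp [PySem.Set.update_nil], hnd⟩
  | cons q rest ih =>
    cases haddn : pvAddNodes numSet q indeg adj with
    | none =>
      have hqbad : ¬ ∀ x ∈ q, x ∈ numSet :=
        ((pvAddNodes_char numSet q indeg adj hsync).1).mp haddn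
      have hstep : pvBuild numSet (q :: rest) indeg adj = none := by
        simp [pvBuild, haddn]
      refine ⟨?_, ?_⟩
      · rw [hstep]
        simp only [true_iff]
        intro hall
        exact hqbad (hall q (List.mem_cons_self))
      · intro i' a' h
        rw [hstep] at h
        exact absurd h (by simp)
    | some st =>
      obtain ⟨i1, a1⟩ := st
      have hqok : ∀ x ∈ q, x ∈ numSet := by
        by_contra hc
        rw [← (pvAddNodes_char numSet q indeg adj hsync).1] at hc
        rw [haddn] at hc
        exact absurd hc (by simp)
      obtain ⟨g1, g2, g3, g4⟩ := (pvAddNodes_char numSet q indeg adj hsync).2 i1 a1 haddn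
      have hinv1 : pvEdgeInv l i1 a1 := ⟨fun a => by rw [g2 a]; exact hinv.1 a,
        fun b => by rw [g1 b]; exact hinv.2 b⟩
      have hnd1 : i1.keys.Nodup := by rw [g3]; exact PySem.Set.nodup_update _ _ hnd
      have hkq : ∀ p ∈ q.zip q.tail, p.1 ∈ i1.keys ∧ p.2 ∈ i1.keys := by
        intro p hp
        rw [g3]
        exact ⟨(PySem.Set.mem_update _ _ _).mpr (Or.inr (List.of_mem_zip hp).1),
          (PySem.Set.mem_update _ _ _).mpr
            (Or.inr (List.mem_of_mem_tail (List.of_mem_zip hp).2))⟩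
      obtain ⟨hinv2, hkeys2, hsync2⟩ := pvAddEdges_char (q.zip q.tail) l i1 a1 hinv1 hkq g4
      have hstep : pvBuild numSet (q :: rest) indeg adj =
          pvBuild numSet rest (pvAddEdges (q.zip q.tail) i1 a1).1
            (pvAddEdges (q.zip q.tail) i1 a1).2 := by
        simp [pvBuild, haddn]
      have hnd2 : (pvAddEdges (q.zip q.tail) i1 a1).1.keys.Nodup := by rw [hkeys2]; exact hnd1
      obtain ⟨ihn, ihs⟩ := ih (l ++ q.zip q.tail) _ _ hinv2 hnd2 hsync2
      refine ⟨?_, ?_⟩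
      · rw [hstep, ihn]
        constructor
        · intro hbad hall
          exact hbad (fun q' hq' => hall q' (List.mem_cons_of_mem _ hq'))
        · intro hbad hall
          refine hbad fun q' hq' => ?_
          rcases List.mem_cons.mp hq' with rfl | hq''
          · exact hqok
          · exact hall q' hq''
      · intro i' a' h
        rw [hstep] at h
        obtain ⟨r1, r2, r3⟩ := ihs i' a' h
        refine ⟨?_, ?_, r3⟩
        · have : l ++ pvPairs (q :: rest) = (l ++ q.zip q.tail) ++ pvPairs rest := by
            simp [pvPairs, List.flatMap_cons]
          rw [this]; exact r1
        · rw [r2, hkeys2, g3, List.flatMap_cons, ← PySem.Set.update_append]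

theorem pvCover_eq_update (ss : List (List Int)) (s : PySem.Set Int) :
    ss.foldl PySem.Set.update s = PySem.Set.update s (ss.flatMap (fun q => q)) := by
  induction ss generalizing s with
  | nil => simp [PySem.Set.update_nil]
  | cons q rest ih =>
    simp only [List.foldl_cons, List.flatMap_cons, ih, PySem.Set.update_append]


-- ===== small list helpers for the Kahn proofs =====

theorem pvEqSingletonOfLen {α : Type} (m : List α) (x : α) (h1 : m.length = 1) (hx : x ∈ m) :
    m = [x] := by
  cases m with
  | nil => simp at hx
  | cons a t =>
    cases t with
    | nil => rcases List.mem_singleton.mp hx with rfl; rfl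
    | cons b t' => simp at h1

theorem pvTwoMemLe {α : Type} (m : List α) (a b : α) (ha : a ∈ m) (hb : b ∈ m) (hne : a ≠ b) :
    2 ≤ m.length := by
  induction m with
  | nil => simp at ha
  | cons z t ih =>
    rcases List.mem_cons.mp ha with rfl | hat
    · rcases List.mem_cons.mp hb with rfl | hbt
      · exact absurd rfl hne
      · have := List.length_pos_of_mem hbt
        simp only [List.length_cons]
        omega
    · have := List.length_pos_of_mem hat
      simp only [List.length_cons]
      rcases List.mem_cons.mp hb with rfl | hbt
      · omega
      · have := ih hat hbt
        omega

theorem pvFilterSingleton {α : Type} (L : List α) (p : α → Bool) (y0 : α)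
    (hnd : L.Nodup) (hmem : y0 ∈ L) (hy : p y0 = true)
    (huniq : ∀ y ∈ L, p y = true → y = y0) : L.filter p = [y0] := by
  induction L with
  | nil => simp at hmem
  | cons z t ih =>
    obtain ⟨hzt, hndt⟩ := List.nodup_cons.mp hnd
    rcases List.mem_cons.mp hmem with rfl | hyt
    · rw [List.filter_cons_of_pos hy]
      have : t.filter p = [] := List.filter_eq_nil_iff.mpr
        (fun a hat hpa => hzt (by rw [← huniq a (List.mem_cons_of_mem _ hat) hpa]; exact hat))
      rw [this]
    · have hpz : ¬ p z = true := fun hpz =>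
        hzt (by rw [huniq z (List.mem_cons_self) hpz]; exact hyt)
      rw [List.filter_cons_of_neg hpz]
      exact ih hndt hyt (fun y hyt' hpy => huniq y (List.mem_cons_of_mem _ hyt') hpy)

theorem pvLengthFilterNe {α : Type} [BEq α] [LawfulBEq α] (m : List α) (x : α) (hnd : m.Nodup) :
    (m.filter (fun a => !(a == x))).length = m.length - (if x ∈ m then 1 else 0) := by
  induction m with
  | nil => simp
  | cons z t ih =>
    obtain ⟨hzt, hndt⟩ := List.nodup_cons.mp hnd
    by_cases hzx : z = x
    · subst hzx
      rw [List.filter_cons_of_neg (by simp)]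
      rw [ih hndt, if_neg hzt, if_pos (List.mem_cons_self)]
      simp only [List.length_cons]
      omega
    · rw [List.filter_cons_of_pos (by simp [hzx])]
      simp only [List.length_cons]
      rw [ih hndt]
      by_cases hxt : x ∈ t
      · have := List.length_pos_of_mem hxt
        rw [if_pos hxt, if_pos (List.mem_cons_of_mem _ hxt)]
        omega
      · have hxzt : x ∉ z :: t := by
          intro hc
          rcases List.mem_cons.mp hc with rfl | h
          · exact hzx rfl
          · exact hxt h
        rw [if_neg hxt, if_neg hxzt]
        simp

theorem pvNotMemTake (nums : List Int) (hnd : nums.Nodup) (j : Nat) (hj : j < nums.length) :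
    nums[j] ∉ nums.take j := by
  intro hmem
  obtain ⟨i, hi, hig⟩ := List.mem_take_iff_getElem.mp hmem
  have : i = j := (List.Nodup.getElem_inj_iff hnd).mp hig
  omega

theorem pvMemTake (nums : List Int) (i j : Nat) (hij : i < j) (hi : i < nums.length) :
    nums[i] ∈ nums.take j :=
  List.mem_take_iff_getElem.mpr ⟨i, by omega, rfl⟩

-- ===== the remaining-predecessor count =====

def pvRemCnt (l : List (Int × Int)) (o : List Int) (y : Int) : Nat :=
  ((pvPredsOf l y).filter (fun a => !(o.contains a))).length

theorem pvRemCnt_nil (l : List (Int × Int)) (y : Int) :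
    pvRemCnt l [] y = (pvPredsOf l y).length := by
  simp [pvRemCnt]

theorem pvRemCnt_snoc (l : List (Int × Int)) (o : List Int) (x y : Int) (hx : x ∉ o) :
    pvRemCnt l (o ++ [x]) y = pvRemCnt l o y - (if x ∈ pvPredsOf l y then 1 else 0) := by
  unfold pvRemCnt
  have hfc : ∀ a ∈ pvPredsOf l y,
      (!((o ++ [x]).contains a)) = ((!(a == x)) && (!(o.contains a))) := by
    intro a _
    by_cases h1 : a ∈ o <;> by_cases h2 : a = x <;>
      simp [List.contains_eq_mem, h1, h2]
  rw [List.filter_congr hfc, ← List.filter_filter]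
  rw [pvLengthFilterNe _ x (List.Nodup.filter _ (pvNodup_predsOf l y))]
  have hmem : x ∈ (pvPredsOf l y).filter (fun a => !(o.contains a)) ↔ x ∈ pvPredsOf l y := by
    simp [List.mem_filter, List.contains_eq_mem, hx]
  by_cases hxp : x ∈ pvPredsOf l y
  · rw [if_pos (hmem.mpr hxp), if_pos hxp]
  · rw [if_neg (fun hc => hxp (hmem.mp hc)), if_neg hxp]

theorem pvRemCnt_pos (l : List (Int × Int)) (o : List Int) (x y : Int)
    (hxp : x ∈ pvPredsOf l y) (hxo : x ∉ o) : 1 ≤ pvRemCnt l o y := by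
  have : x ∈ (pvPredsOf l y).filter (fun a => !(o.contains a)) := by
    simp [List.mem_filter, List.contains_eq_mem, hxp, hxo]
  have := List.length_pos_of_mem this
  unfold pvRemCnt
  omega

-- ===== the relax loop =====

theorem pvRelax_fst_getD (L : List Int) (indeg : PySem.Dict Int Int) (q : List Int) (y : Int)
    (hnd : L.Nodup) :
    (pvRelax L indeg q).1.getD y 0 = indeg.getD y 0 - (if y ∈ L then 1 else 0) := by
  induction L generalizing indeg q with
  | nil => simp [pvRelax]
  | cons z t ih =>
    obtain ⟨hzt, hndt⟩ := List.nodup_cons.mp hnd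
    simp only [pvRelax]
    have hmain : ∀ q' : List Int,
        (pvRelax t (indeg.insert z (indeg.getD z 0 - 1)) q').1.getD y 0
          = indeg.getD y 0 - (if y ∈ z :: t then 1 else 0) := by
      intro q'
      rw [ih _ _ hndt, PySem.Dict.getD_insert]
      by_cases hyz : y = z
      · subst hyz
        rw [if_pos rfl, if_neg hzt, if_pos (List.mem_cons_self)]
        omega
      · rw [if_neg hyz]
        by_cases hyt : y ∈ t
        · rw [if_pos hyt, if_pos (List.mem_cons_of_mem _ hyt)]
        · have hyzt : y ∉ z :: t := by
            intro hc
            rcases List.mem_cons.mp hc with rfl | h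
            · exact hyz rfl
            · exact hyt h
          rw [if_neg hyt, if_neg hyzt]
    by_cases hcond : ((indeg.insert z (indeg.getD z 0 - 1)).getD z 0 == 0) = true
    · rw [if_pos hcond]; exact hmain _
    · rw [if_neg hcond]; exact hmain _

theorem pvRelax_snd (L : List Int) (indeg : PySem.Dict Int Int) (q : List Int)
    (hnd : L.Nodup) :
    (pvRelax L indeg q).2 = q ++ L.filter (fun y => indeg.getD y 0 == 1) := by
  induction L generalizing indeg q with
  | nil => simp [pvRelax]
  | cons z t ih =>
    obtain ⟨hzt, hndt⟩ := List.nodup_cons.mp hnd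
    simp only [pvRelax]
    have hgz : (indeg.insert z (indeg.getD z 0 - 1)).getD z 0 = indeg.getD z 0 - 1 := by
      rw [PySem.Dict.getD_insert, if_pos rfl]
    have hfilt : t.filter (fun y => (indeg.insert z (indeg.getD z 0 - 1)).getD y 0 == 1)
        = t.filter (fun y => indeg.getD y 0 == 1) := by
      refine List.filter_congr ?_
      intro y hyt
      rw [PySem.Dict.getD_insert, if_neg (show ¬ y = z from fun hc => hzt (by rw [← hc]; exact hyt))]
    by_cases hz1 : indeg.getD z 0 = 1
    · have hcond : ((indeg.insert z (indeg.getD z 0 - 1)).getD z 0 == 0) = true := by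
        rw [hgz, hz1]; rfl
      rw [if_pos hcond, ih _ _ hndt, hfilt,
        List.filter_cons_of_pos (by simp [hz1]), List.append_assoc]
      rfl
    · have hcond : ¬ ((indeg.insert z (indeg.getD z 0 - 1)).getD z 0 == 0) = true := by
        rw [hgz]
        simp only [beq_iff_eq]
        omega
      rw [if_neg hcond, ih _ _ hndt, hfilt,
        List.filter_cons_of_neg (by simp [hz1])]

-- ===== Kahn: completeness (the valid order is accepted) =====

theorem pvKahn_complete (nums : List Int) (l : List (Int × Int)) (adj : PySem.Dict Int (List Int))
    (hnd : nums.Nodup)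
    (hcomp : ∀ p ∈ l, p.1 ∈ nums ∧ p.2 ∈ nums)
    (hadj : ∀ x : Int, adj.getD x [] = pvSuccsOf l x)
    (hfwd : ∀ (i j : Nat) (hi : i < nums.length) (hj : j < nums.length),
      (nums[i], nums[j]) ∈ l → i < j)
    (hchain : ∀ (j : Nat) (hj : j < nums.length), 1 ≤ j → (nums[j-1]'(by omega), nums[j]) ∈ l) :
    ∀ (fuel k : Nat), k ≤ nums.length → nums.length - k < fuel →
      ∀ (indeg : PySem.Dict Int Int) (queue : List Int),
      (∀ y ∈ nums, indeg.getD y 0 = (pvRemCnt l (nums.take k) y : Int)) →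
      queue = (nums.drop k).take 1 →
      pvKahn adj fuel indeg queue (nums.take k) = ([], nums) := by
  intro fuel
  induction fuel with
  | zero => intro k hk hfuel; omega
  | succ fuel ih =>
    intro k hk hfuel indeg queue hindeg hqueue
    by_cases hkn : k = nums.length
    · subst hkn
      rw [List.drop_length] at hqueue
      simp only [List.take_nil] at hqueue
      subst hqueue
      simp [pvKahn, List.take_length]
    · have hklt : k < nums.length := by omega
      rw [List.drop_eq_getElem_cons hklt, List.take_succ_cons, List.take_zero] at hqueue
      subst hqueue
      have htk : nums.take (k + 1) = nums.take k ++ [nums[k]] := by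
        rw [List.take_add_one, List.getElem?_eq_getElem hklt]
        rfl
      have hLnd : (pvSuccsOf l nums[k]).Nodup := pvNodup_succsOf l _
      have hmemL : ∀ y, y ∈ pvSuccsOf l nums[k] ↔ (nums[k], y) ∈ l :=
        fun y => pvMem_succsOf l _ y
      have hxtk : nums[k] ∉ nums.take k := pvNotMemTake nums hnd k hklt
      have hfst : ∀ y ∈ nums, (pvRelax (pvSuccsOf l nums[k]) indeg []).1.getD y 0
          = (pvRemCnt l (nums.take (k + 1)) y : Int) := by
        intro y hy
        rw [pvRelax_fst_getD _ _ _ _ hLnd, hindeg y hy, htk,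
          pvRemCnt_snoc l (nums.take k) nums[k] y hxtk]
        by_cases hyL : y ∈ pvSuccsOf l nums[k]
        · have hxp : nums[k] ∈ pvPredsOf l y := (pvMem_predsOf l _ y).mpr ((hmemL y).mp hyL)
          have h1 := pvRemCnt_pos l (nums.take k) nums[k] y hxp hxtk
          rw [if_pos hyL, if_pos hxp]
          omega
        · have hxp : nums[k] ∉ pvPredsOf l y :=
            fun hc => hyL ((hmemL y).mpr ((pvMem_predsOf l _ y).mp hc))
          rw [if_neg hyL, if_neg hxp]
          omega
      have hsnd : (pvRelax (pvSuccsOf l nums[k]) indeg []).2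
          = (nums.drop (k + 1)).take 1 := by
        rw [pvRelax_snd _ _ _ hLnd, List.nil_append]
        by_cases hk1 : k + 1 = nums.length
        · rw [hk1, List.drop_length, List.take_nil]
          refine List.filter_eq_nil_iff.mpr ?_
          intro y hyL _
          have hpair := (hmemL y).mp hyL
          obtain ⟨-, hyn⟩ := hcomp _ hpair
          obtain ⟨m, hm, hym⟩ := List.mem_iff_getElem.mp hyn
          subst hym
          have := hfwd k m hklt hm hpair
          omega
        · have hk1lt : k + 1 < nums.length := by omega
          rw [List.drop_eq_getElem_cons hk1lt, List.take_succ_cons, List.take_zero]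
          refine pvFilterSingleton _ _ _ hLnd ?_ ?_ ?_
          · refine (hmemL _).mpr ?_
            have := hchain (k + 1) hk1lt (by omega)
            simpa using this
          · rw [hindeg _ (List.getElem_mem hk1lt)]
            have hone : pvRemCnt l (nums.take k) (nums[k + 1]) = 1 := by
              unfold pvRemCnt
              rw [pvFilterSingleton (pvPredsOf l nums[k + 1]) _ nums[k]
                (pvNodup_predsOf l _) ?_ ?_ ?_]
              · rfl
              · refine (pvMem_predsOf l _ _).mpr ?_
                have := hchain (k + 1) hk1lt (by omega)
                simpa using this
              · simp [List.contains_eq_mem, hxtk]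
              · intro a ha hpa
                have hpair := (pvMem_predsOf l _ _).mp ha
                obtain ⟨han, -⟩ := hcomp _ hpair
                obtain ⟨i, hi, hai⟩ := List.mem_iff_getElem.mp han
                subst hai
                have hik := hfwd i (k + 1) hi hk1lt hpair
                have hige : ¬ i < k := by
                  intro hilt
                  rw [List.contains_eq_mem] at hpa
                  simp only [Bool.not_eq_true', decide_eq_false_iff_not] at hpa
                  exact hpa (pvMemTake nums i k hilt hi)
                have : i = k := by omega
                exact (List.Nodup.getElem_inj_iff hnd).mpr this
            rw [hone]
            rfl
          · intro y hyL hpred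
            have hpair := (hmemL y).mp hyL
            obtain ⟨-, hyn⟩ := hcomp _ hpair
            obtain ⟨m, hm, hym⟩ := List.mem_iff_getElem.mp hyn
            subst hym
            have hkm := hfwd k m hklt hm hpair
            by_contra hne
            have hmne : m ≠ k + 1 := fun hc => hne (by subst hc; rfl)
            have hm2 : k + 2 ≤ m := by omega
            -- two distinct remaining predecessors: nums[k] and nums[m-1]
            have hp1 : nums[k] ∈ pvPredsOf l nums[m] := (pvMem_predsOf l _ _).mpr hpair
            have hp2 : nums[m-1]'(by omega) ∈ pvPredsOf l nums[m] :=
              (pvMem_predsOf l _ _).mpr (hchain m hm (by omega))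
            have hp2nt : nums[m-1]'(by omega) ∉ nums.take k := by
              intro hmem
              obtain ⟨i, hi, hig⟩ := List.mem_take_iff_getElem.mp hmem
              have : i = m - 1 := (List.Nodup.getElem_inj_iff hnd).mp hig
              omega
            have hne2 : nums[k] ≠ nums[m-1]'(by omega) := by
              intro hc
              have : k = m - 1 := (List.Nodup.getElem_inj_iff hnd).mp hc
              omega
            have h2 : 2 ≤ pvRemCnt l (nums.take k) nums[m] := by
              unfold pvRemCnt
              refine pvTwoMemLe _ _ _ ?_ ?_ hne2
              · simp [List.mem_filter, List.contains_eq_mem, hp1, hxtk]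
              · simp [List.mem_filter, List.contains_eq_mem, hp2, hp2nt]
            rw [hindeg _ (List.getElem_mem hm)] at hpred
            simp only [beq_iff_eq] at hpred
            omega
      -- one step of the loop
      simp only [pvKahn]
      rw [hadj nums[k]]
      rw [← htk] at *
      exact ih (k + 1) (by omega) (by omega) _ _
        (by rw [htk]; exact fun y hy => by rw [htk] at hfst ⊢; exact hfst y hy) hsnd


-- ===== Kahn: soundness (an accepted run certifies order and chain) =====

def pvGood (nums : List Int) (l : List (Int × Int)) (o queue : List Int)
    (indeg : PySem.Dict Int Int) : Prop :=
  o.Nodup ∧ (∀ z ∈ o, z ∈ nums) ∧ queue.Nodup ∧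
  (∀ y, y ∈ queue ↔ (y ∈ nums ∧ y ∉ o ∧ ∀ a ∈ pvPredsOf l y, a ∈ o)) ∧
  (∀ y ∈ nums, indeg.getD y 0 = (pvRemCnt l o y : Int)) ∧
  (∀ y ∈ o, ∀ a ∈ pvPredsOf l y, a ∈ o)

theorem pvKahn_sound (nums : List Int) (l : List (Int × Int)) (adj : PySem.Dict Int (List Int))
    (hnd : nums.Nodup)
    (hcomp : ∀ p ∈ l, p.1 ∈ nums ∧ p.2 ∈ nums)
    (hadj : ∀ x : Int, adj.getD x [] = pvSuccsOf l x) :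
    ∀ (fuel : Nat) (o queue : List Int) (indeg : PySem.Dict Int Int),
      pvGood nums l o queue indeg →
      pvKahn adj fuel indeg queue o = ([], nums) →
      o <+: nums ∧
      (∀ h : o.length < nums.length, queue = [nums[o.length]'h]) ∧
      (∀ (j : Nat) (hj : j < nums.length), o.length ≤ j →
        ∀ a ∈ pvPredsOf l (nums[j]'hj), a ∈ nums.take j) ∧
      (∀ (j : Nat) (hj : j < nums.length), o.length + 1 ≤ j →
        ((nums[j-1]'(by omega), nums[j]'hj) ∈ l)) := by
  intro fuel
  induction fuel with
  | zero =>
    intro o queue indeg hgood heq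
    simp only [pvKahn, Prod.mk.injEq] at heq
    obtain ⟨hq, ho⟩ := heq
    subst hq; subst ho
    refine ⟨List.prefix_refl _, ?_, ?_, ?_⟩
    · intro h; omega
    · intro j hj hle; omega
    · intro j hj hle; omega
  | succ fuel ih =>
    intro o queue indeg hgood heq
    match queue, heq with
    | [], heq =>
      simp only [pvKahn, Prod.mk.injEq] at heq
      obtain ⟨-, ho⟩ := heq
      subst ho
      refine ⟨List.prefix_refl _, ?_, ?_, ?_⟩
      · intro h; omega
      · intro j hj hle; omega
      · intro j hj hle; omega
    | x :: b :: t2, heq =>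
      simp only [pvKahn, Prod.mk.injEq] at heq
      obtain ⟨hq, ho⟩ := heq
      simp at hq
    | [x], heq =>
      obtain ⟨hond, hosub, hqnd, hqchar, hindeg, hclosed⟩ := hgood
      obtain ⟨hxn, hxo, hxready⟩ := (hqchar x).mp (List.mem_cons_self)
      simp only [pvKahn] at heq
      rw [hadj x] at heq
      have hLnd : (pvSuccsOf l x).Nodup := pvNodup_succsOf l x
      have hsnd : (pvRelax (pvSuccsOf l x) indeg []).2
          = (pvSuccsOf l x).filter (fun y => indeg.getD y 0 == 1) := by
        rw [pvRelax_snd _ _ _ hLnd, List.nil_append]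
      -- the new state is good for o ++ [x]
      have hchar' : ∀ y, y ∈ (pvSuccsOf l x).filter (fun y => indeg.getD y 0 == 1) ↔
          (y ∈ nums ∧ y ∉ o ++ [x] ∧ ∀ a ∈ pvPredsOf l y, a ∈ o ++ [x]) := by
        intro y
        constructor
        · intro hy
          obtain ⟨hyL, hpred⟩ := List.mem_filter.mp hy
          have hpair : (x, y) ∈ l := (pvMem_succsOf l x y).mp hyL
          have hyn : y ∈ nums := (hcomp _ hpair).2
          have hxpy : x ∈ pvPredsOf l y := (pvMem_predsOf l x y).mpr hpair
          have hcnt : pvRemCnt l o y = 1 := by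
            rw [hindeg y hyn] at hpred
            simp only [beq_iff_eq] at hpred
            omega
          have hxfil : x ∈ (pvPredsOf l y).filter (fun a => !(o.contains a)) := by
            simp [List.mem_filter, List.contains_eq_mem, hxpy, hxo]
          have hfil : (pvPredsOf l y).filter (fun a => !(o.contains a)) = [x] :=
            pvEqSingletonOfLen _ _ hcnt hxfil
          have hsub : ∀ a ∈ pvPredsOf l y, a ∈ o ++ [x] := by
            intro a ha
            by_cases hao : a ∈ o
            · exact List.mem_append_left _ hao
            · have hmem : a ∈ (pvPredsOf l y).filter (fun a => !(o.contains a)) := by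
                simp [List.mem_filter, List.contains_eq_mem, ha, hao]
              rw [hfil] at hmem
              rcases List.mem_singleton.mp hmem with rfl
              exact List.mem_append_right _ (List.mem_singleton.mpr rfl)
          refine ⟨hyn, ?_, hsub⟩
          intro hyo'
          rcases List.mem_append.mp hyo' with hyo | hyx
          · exact hxo (hclosed y hyo x hxpy)
          · rcases List.mem_singleton.mp hyx with rfl
            exact hxo (hxready y hxpy)
        · rintro ⟨hyn, hyo', hsub⟩
          have hyno : y ∉ o := fun h => hyo' (List.mem_append_left _ h)
          have hynx : y ≠ x := fun h => hyo' (by rw [h]; exact List.mem_append_right _ (by simp))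
          have hxpy : x ∈ pvPredsOf l y := by
            by_contra hnx
            have hsubo : ∀ a ∈ pvPredsOf l y, a ∈ o := by
              intro a ha
              rcases List.mem_append.mp (hsub a ha) with h | h
              · exact h
              · rcases List.mem_singleton.mp h with rfl
                exact absurd ha hnx
            have hyq : y ∈ [x] := (hqchar y).mpr ⟨hyn, hyno, hsubo⟩
            exact hynx (List.mem_singleton.mp hyq)
          have hyL : y ∈ pvSuccsOf l x :=
            (pvMem_succsOf l x y).mpr ((pvMem_predsOf l x y).mp hxpy)
          have hfil : (pvPredsOf l y).filter (fun a => !(o.contains a)) = [x] := by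
            refine pvFilterSingleton _ _ _ (pvNodup_predsOf l y) hxpy
              (by simp [List.contains_eq_mem, hxo]) ?_
            intro a ha hpa
            rcases List.mem_append.mp (hsub a ha) with h | h
            · rw [List.contains_eq_mem] at hpa
              simp only [Bool.not_eq_eq_eq_not, Bool.not_true, decide_eq_false_iff_not] at hpa
              exact absurd h hpa
            · exact List.mem_singleton.mp h
          refine List.mem_filter.mpr ⟨hyL, ?_⟩
          rw [hindeg y hyn]
          unfold pvRemCnt
          rw [hfil]
          simp
      have hgood' : pvGood nums l (o ++ [x]) ((pvRelax (pvSuccsOf l x) indeg []).2)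
          (pvRelax (pvSuccsOf l x) indeg []).1 := by
        refine ⟨?_, ?_, ?_, ?_, ?_, ?_⟩
        · rw [List.nodup_append]
          exact ⟨hond, List.nodup_singleton _, fun a ha b hb =>
            by rcases List.mem_singleton.mp hb with rfl; exact fun hc => hxo (hc ▸ ha)⟩
        · intro z hz
          rcases List.mem_append.mp hz with h | h
          · exact hosub z h
          · rcases List.mem_singleton.mp h with rfl; exact hxn
        · rw [hsnd]; exact List.Nodup.filter _ hLnd
        · intro y; rw [hsnd]; exact hchar' y
        · intro y hy
          rw [pvRelax_fst_getD _ _ _ _ hLnd, hindeg y hy, pvRemCnt_snoc l o x y hxo]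
          by_cases hyL : y ∈ pvSuccsOf l x
          · have hxp : x ∈ pvPredsOf l y :=
              (pvMem_predsOf l x y).mpr ((pvMem_succsOf l x y).mp hyL)
            have h1 := pvRemCnt_pos l o x y hxp hxo
            rw [if_pos hyL, if_pos hxp]
            omega
          · have hxp : x ∉ pvPredsOf l y :=
              fun hc => hyL ((pvMem_succsOf l x y).mpr ((pvMem_predsOf l x y).mp hc))
            rw [if_neg hyL, if_neg hxp]
            omega
        · intro y hy a ha
          rcases List.mem_append.mp hy with h | h
          · exact List.mem_append_left _ (hclosed y h a ha)
          · rcases List.mem_singleton.mp h with rfl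
            exact List.mem_append_left _ (hxready a ha)
      obtain ⟨hpre', hq2', hc3', hc4'⟩ := ih (o ++ [x]) _ _ hgood' heq
      have hpre : o <+: nums := List.IsPrefix.trans ⟨[x], rfl⟩ hpre'
      have holen : o.length + 1 ≤ nums.length := by
        have := hpre'.length_le
        simp only [List.length_append, List.length_singleton] at this
        exact this
      have hxeq : x = nums[o.length]'(by omega) := by
        have h2 := List.IsPrefix.getElem hpre' (i := o.length)
          (by simp only [List.length_append, List.length_singleton]; omega)
        rw [List.getElem_concat_length rfl _] at h2
        exact h2
      have hotake : o = nums.take o.length := List.prefix_iff_eq_take.mp hpre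
      refine ⟨hpre, ?_, ?_, ?_⟩
      · intro h
        rw [hxeq]
      · intro j hj hle a ha
        rcases Nat.eq_or_lt_of_le hle with heq' | hlt
        · have ha' : a ∈ pvPredsOf l x := by
            rw [hxeq]
            have : nums[o.length]'(by omega) = nums[j]'hj := by
              congr 1
            rw [this]
            exact ha
          have hao : a ∈ o := hxready a ha'
          rw [← heq', ← hotake]
          exact hao
        · exact hc3' j hj (by simp only [List.length_append, List.length_singleton]; omega) a ha
      · intro j hj hge
        by_cases hj1 : j = o.length + 1
        · have hlen' : (o ++ [x]).length < nums.length := by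
            simp only [List.length_append, List.length_singleton]; omega
          have hqq := hq2' hlen'
          rw [hsnd] at hqq
          have hmemq : nums[(o ++ [x]).length]'hlen'
              ∈ (pvSuccsOf l x).filter (fun y => indeg.getD y 0 == 1) := by
            rw [hqq]; exact List.mem_singleton.mpr rfl
          have hyL := (List.mem_filter.mp hmemq).1
          have hpair := (pvMem_succsOf l x _).mp hyL
          have hidx : (o ++ [x]).length = j := by
            simp only [List.length_append, List.length_singleton]; omega
          have hx' : x = nums[j-1]'(by omega) := by
            refine hxeq.trans ?_
            congr 1
            omega
          have hcast : nums[(o ++ [x]).length]'hlen' = nums[j]'hj := by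
            congr 1
          rw [← hx', ← hcast]
          exact hpair
        · exact hc4' j hj (by simp only [List.length_append, List.length_singleton]; omega)

-- ===== VERDICT (by name: the statement is the Claim_ definition above) =====
theorem sequenceReconstruction_optimized_validation_spec : Claim_equal_sequenceReconstruction_optimized_validation := by
  intro nums ss _
  unfold Spec_sequenceReconstruction_optimized_validation
  unfold sequenceReconstruction_optimized_validation sequenceReconstruction_optimized_validation_alt
  by_cases hemp : ss.isEmpty = true
  · simp [hemp]
  · have hemp' : ss.isEmpty = false := by simpa using hemp
    simp only [hemp', Bool.false_eq_true, if_false]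
    rw [pvSeqNumsLoop_eq]
    have hinv0 : pvEdgeInv [] (PySem.Dict.empty : PySem.Dict Int Int)
        (PySem.Dict.empty : PySem.Dict Int (List Int)) := by
      constructor
      · intro a; rw [PySem.Dict.getD_empty]; simp [pvSuccsOf]
      · intro b; rw [PySem.Dict.getD_empty]; simp [pvPredsOf]
    have hsync0 : ∀ y : Int, (PySem.Dict.empty : PySem.Dict Int (List Int)).contains y
        = (PySem.Dict.empty : PySem.Dict Int Int).contains y := by
      intro y; rw [PySem.Dict.contains_empty, PySem.Dict.contains_empty]
    have hbc := pvBuild_char (PySem.Set.ofList nums) ss [] PySem.Dict.empty PySem.Dict.empty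
      hinv0 (by rw [PySem.Dict.keys_empty]; exact List.nodup_nil) hsync0
    by_cases hval : ∀ q ∈ ss, ∀ x ∈ q, x ∈ nums
    · have hvalB : ∀ q ∈ ss, ∀ x ∈ q, x ∈ PySem.Set.ofList nums :=
        fun q hq x hx => (PySem.Set.mem_ofList _ _).mpr (hval q hq x hx)
      have hA1 : pvValid (pvPos nums) ss = true := by
        simp only [pvValid, List.all_eq_true]
        exact fun q hq x hx => (pvPos_contains nums x).mpr (hval q hq x hx)
      rw [if_pos hA1]
      cases hbuild : pvBuild (PySem.Set.ofList nums) ss PySem.Dict.empty PySem.Dict.empty with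
      | none => exact absurd hvalB (hbc.1.mp hbuild)
      | some st =>
        obtain ⟨indeg, adj⟩ := st
        obtain ⟨hinvp, hkeys, hknd⟩ := hbc.2 indeg adj hbuild
        have hinv : pvEdgeInv (pvPairs ss) indeg adj := by
          rw [List.nil_append] at hinvp; exact hinvp
        have hadj := hinv.1
        have hideg := hinv.2
        have hcover : ss.foldl PySem.Set.update PySem.Set.empty
            = PySem.Set.ofList (ss.flatMap (fun q => q)) := by
          rw [pvCover_eq_update]
          exact PySem.Set.update_nil_left _
        have hkeys' : indeg.keys = PySem.Set.ofList (ss.flatMap (fun q => q)) := by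
          rw [hkeys, PySem.Dict.keys_empty]
          exact PySem.Set.update_nil_left _
        simp only [hcover, hkeys']
        by_cases hlen : (PySem.Set.ofList (ss.flatMap (fun q => q))).length = nums.length
        · have hlenne : ¬ (PySem.Set.ofList (ss.flatMap (fun q => q))).length ≠ nums.length :=
            fun hc => hc hlen
          rw [if_neg hlenne]
          rw [if_neg hlenne]
          -- the valid full-coverage case: set up the graph context
          have hcovsub : PySem.Set.ofList (ss.flatMap (fun q => q)) ⊆ nums := by
            intro x hx
            rw [PySem.Set.mem_ofList, List.mem_flatMap] at hx
            obtain ⟨q, hq, hxq⟩ := hx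
            exact hval q hq x hxq
          have hnd : nums.Nodup :=
            pvNodup_of_cover nums _ (PySem.Set.nodup_ofList _) hcovsub hlen
          have hperm := pvPerm_of_cover nums _ (PySem.Set.nodup_ofList _) hcovsub hlen
          have hkeymem : ∀ x, x ∈ indeg.keys ↔ x ∈ nums := by
            intro x
            rw [hkeys']
            exact hperm.mem_iff
          have hcomp : ∀ p ∈ pvPairs ss, p.1 ∈ nums ∧ p.2 ∈ nums := by
            intro p hp
            obtain ⟨q, hq, h1, h2⟩ := pvPairs_mem_comp ss p hp
            exact ⟨hval q hq _ h1, hval q hq _ h2⟩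
          rw [pvPredsLoop_eq]
          -- B-side characterisation via Kahn soundness / completeness
          have hBiff : ((pvKahn adj (nums.length + 1) indeg
                ((PySem.Set.ofList (ss.flatMap (fun q => q))).filter
                  (fun x => indeg.getD x 0 == 0)) []).1.isEmpty &&
              ((pvKahn adj (nums.length + 1) indeg
                ((PySem.Set.ofList (ss.flatMap (fun q => q))).filter
                  (fun x => indeg.getD x 0 == 0)) []).2 == nums)) = true
              ↔ ((∀ (i j : Nat) (hi : i < nums.length) (hj : j < nums.length),
                    (nums[i], nums[j]) ∈ pvPairs ss → i < j) ∧
                 (∀ (j : Nat) (hj : j < nums.length), 1 ≤ j →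
                    (nums[j-1]'(by omega), nums[j]'hj) ∈ pvPairs ss)) := by
            rw [← hkeys']
            constructor
            · intro h
              obtain ⟨h1, h2⟩ := Bool.and_eq_true_iff.mp h
              have h1' : (pvKahn adj (nums.length + 1) indeg
                  (indeg.keys.filter (fun x => indeg.getD x 0 == 0)) []).1 = [] :=
                List.isEmpty_iff.mp h1
              have h2' : (pvKahn adj (nums.length + 1) indeg
                  (indeg.keys.filter (fun x => indeg.getD x 0 == 0)) []).2 = nums := by
                simpa using h2
              have hres : pvKahn adj (nums.length + 1) indeg
                  (indeg.keys.filter (fun x => indeg.getD x 0 == 0)) [] = ([], nums) :=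
                Prod.ext_iff.mpr ⟨h1', h2'⟩
              have hgood0 : pvGood nums (pvPairs ss) []
                  (indeg.keys.filter (fun x => indeg.getD x 0 == 0)) indeg := by
                refine ⟨List.nodup_nil, by simp, List.Nodup.filter _ hknd, ?_, ?_, by simp⟩
                · intro y
                  rw [List.mem_filter]
                  constructor
                  · rintro ⟨hyk, hy0⟩
                    rw [hideg y] at hy0
                    simp only [beq_iff_eq] at hy0
                    have hlen0 : (pvPredsOf (pvPairs ss) y).length = 0 := by omega
                    refine ⟨(hkeymem y).mp hyk, by simp, ?_⟩
                    intro a ha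
                    rw [List.length_eq_zero_iff.mp hlen0] at ha
                    simp at ha
                  · rintro ⟨hyn, -, hsub⟩
                    refine ⟨(hkeymem y).mpr hyn, ?_⟩
                    rw [hideg y]
                    have : pvPredsOf (pvPairs ss) y = [] := by
                      rw [List.eq_nil_iff_forall_not_mem]
                      intro a ha
                      simpa using hsub a ha
                    rw [this]
                    rfl
                · intro y hy
                  rw [hideg y, pvRemCnt_nil]
              obtain ⟨-, -, hc3, hc4⟩ := pvKahn_sound nums (pvPairs ss) adj hnd hcomp hadj
                (nums.length + 1) [] _ indeg hgood0 hres
              constructor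
              · intro i j hi hj hpair
                have hap : nums[i] ∈ pvPredsOf (pvPairs ss) (nums[j]'hj) :=
                  (pvMem_predsOf _ _ _).mpr hpair
                have := hc3 j hj (by simp) _ hap
                obtain ⟨i', hi', hig⟩ := List.mem_take_iff_getElem.mp this
                have : i' = i := (List.Nodup.getElem_inj_iff hnd).mp hig
                omega
              · intro j hj hj1
                exact hc4 j hj (by simpa using hj1)
            · rintro ⟨F, C⟩
              have hq0 : indeg.keys.filter (fun x => indeg.getD x 0 == 0) = nums.take 1 := by
                by_cases h0 : nums.length = 0
                · have hnil : nums = [] := List.length_eq_zero_iff.mp h0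
                  have hkl : indeg.keys.length = 0 := by rw [hkeys', hlen, h0]
                  rw [List.length_eq_zero_iff.mp hkl, hnil]
                  rfl
                · have h0' : 0 < nums.length := by omega
                  have htake1 : nums.take 1 = [nums[0]'h0'] := by
                    cases nums with
                    | nil => simp at h0'
                    | cons a t => rfl
                  rw [htake1]
                  refine pvFilterSingleton _ _ _ hknd
                    ((hkeymem _).mpr (List.getElem_mem h0')) ?_ ?_
                  · rw [hideg]
                    have : pvPredsOf (pvPairs ss) (nums[0]'h0') = [] := by
                      rw [List.eq_nil_iff_forall_not_mem]
                      intro a ha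
                      have hpair := (pvMem_predsOf _ _ _).mp ha
                      obtain ⟨han, -⟩ := hcomp _ hpair
                      obtain ⟨i, hi, hai⟩ := List.mem_iff_getElem.mp han
                      subst hai
                      have := F i 0 hi h0' hpair
                      omega
                    rw [this]
                    rfl
                  · intro y hyk hy0
                    rw [hideg y] at hy0
                    simp only [beq_iff_eq] at hy0
                    have hyn : y ∈ nums := (hkeymem y).mp hyk
                    obtain ⟨m, hm, hym⟩ := List.mem_iff_getElem.mp hyn
                    subst hym
                    have hm0 : m = 0 := by
                      by_contra hmne
                      have hm1 : 1 ≤ m := by omega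
                      have hp := C m hm hm1
                      have hmem : nums[m-1]'(by omega) ∈ pvPredsOf (pvPairs ss) (nums[m]'hm) :=
                        (pvMem_predsOf _ _ _).mpr hp
                      have := List.length_pos_of_mem hmem
                      omega
                    exact (List.Nodup.getElem_inj_iff hnd).mpr hm0
              have hres := pvKahn_complete nums (pvPairs ss) adj hnd hcomp hadj F C
                (nums.length + 1) 0 (by omega) (by omega) indeg
                (indeg.keys.filter (fun x => indeg.getD x 0 == 0))
                (by
                  intro y hy
                  rw [List.take_zero, hideg y, pvRemCnt_nil])
                (by rw [List.drop_zero, hq0])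
              rw [List.take_zero] at hres
              rw [hres]
              simp
          by_cases hany : ((pvPairs ss).any
              (fun p => decide ((pvPos nums).getD p.2 0 ≤ (pvPos nums).getD p.1 0))) = true
          · rw [if_pos hany]
            simp only []
            symm
            rw [← Bool.not_eq_true]
            intro hB
            obtain ⟨F, C⟩ := hBiff.mp hB
            obtain ⟨p, hp, hple⟩ := List.any_eq_true.mp hany
            simp only [decide_eq_true_eq] at hple
            obtain ⟨h1n, h2n⟩ := hcomp p hp
            obtain ⟨k1, hk1, hget1, hval1⟩ := pvPos_getD_mem nums hnd p.1 h1n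
            obtain ⟨k2, hk2, hget2, hval2⟩ := pvPos_getD_mem nums hnd p.2 h2n
            have hlt : k1 < k2 := by
              refine F k1 k2 hk1 hk2 ?_
              have : p = (nums[k1], nums[k2]) := Prod.ext_iff.mpr ⟨hget1.symm, hget2.symm⟩
              rw [← this]
              exact hp
            rw [hval1, hval2] at hple
            omega
          · have hanyf := List.any_eq_false.mp (eq_false_of_ne_true hany)
            rw [if_neg hany]
            simp only []
            rw [Bool.eq_iff_iff, hBiff]
            constructor
            · intro h
              constructor
              · intro i j hi hj hpair
                have := hanyf _ hpair
                simp only [pvPos_getD_getElem nums hnd i hi,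
                  pvPos_getD_getElem nums hnd j hj, decide_eq_true_eq] at this
                omega
              · intro j hj hj1
                have hjmem : ((j : Int)) ∈ PySem.List.pyRange 1 (nums.length : Int) 1 :=
                  PySem.List.mem_pyRange_one.mpr ⟨by exact_mod_cast hj1, by exact_mod_cast hj⟩
                have hh := List.all_eq_true.mp h _ hjmem
                rw [PySem.List.pyGetD_eq_getElem _ _ (by omega)
                  (by rw [pvPredsFold_length, List.length_replicate]; omega)] at hh
                rw [PySem.Set.contains_iff] at hh
                rw [pvPredsFold_mem (pvPos nums) (pvPairs ss) _ ((j : Int)).toNat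
                  (by rw [List.length_replicate]; omega) _] at hh
                rcases hh with hh | ⟨p, hp, hpos2, hpos1⟩
                · rw [List.getElem_replicate] at hh
                  simp [PySem.Set.empty] at hh
                · obtain ⟨h1n, h2n⟩ := hcomp p hp
                  obtain ⟨k1, hk1, hget1, hval1⟩ := pvPos_getD_mem nums hnd p.1 h1n
                  obtain ⟨k2, hk2, hget2, hval2⟩ := pvPos_getD_mem nums hnd p.2 h2n
                  have hk2j : k2 = j := by
                    rw [hval2] at hpos2
                    omega
                  have hk1j : k1 = j - 1 := by
                    rw [hval1] at hpos1
                    omega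
                  have hpeq : p = (nums[j-1]'(by omega), nums[j]'hj) := by
                    have e1 : p.1 = nums[j-1]'(by omega) := by
                      rw [← hget1]
                      congr 1
                    have e2 : p.2 = nums[j]'hj := by
                      rw [← hget2]
                      congr 1
                    exact Prod.ext_iff.mpr ⟨e1, e2⟩
                  rw [← hpeq]
                  exact hp
            · rintro ⟨F, C⟩
              refine List.all_eq_true.mpr ?_
              intro i hi
              have hi' := PySem.List.mem_pyRange_one.mp hi
              have hj1 : 1 ≤ i.toNat := by omega
              have hjlt : i.toNat < nums.length := by omega
              have hpair := C i.toNat hjlt hj1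
              rw [PySem.List.pyGetD_eq_getElem _ _ (by omega)
                (by rw [pvPredsFold_length, List.length_replicate]; omega)]
              rw [PySem.Set.contains_iff]
              rw [pvPredsFold_mem (pvPos nums) (pvPairs ss) _ i.toNat
                (by rw [List.length_replicate]; omega) _]
              refine Or.inr ⟨_, hpair, ?_, ?_⟩
              · rw [pvPos_getD_getElem nums hnd i.toNat hjlt]
                omega
              · rw [pvPos_getD_getElem nums hnd (i.toNat - 1) (by omega)]
                omega
        · rw [if_pos hlen]
          rw [if_pos hlen]
    · have hA1 : pvValid (pvPos nums) ss = false := by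
        rw [← Bool.not_eq_true]
        simp only [pvValid, List.all_eq_true]
        intro hc
        exact hval (fun q hq x hx => (pvPos_contains nums x).mp (hc q hq x hx))
      rw [if_neg (by rw [hA1]; simp)]
      have hbuildn : pvBuild (PySem.Set.ofList nums) ss PySem.Dict.empty PySem.Dict.empty = none := by
        rw [hbc.1]
        intro hc
        exact hval (fun q hq x hx => (PySem.Set.mem_ofList _ _).mp (hc q hq x hx))
      rw [hbuildn]
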